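-- pv_equiv track=rewrite | github.com/BehroozMontazeran/pyTOjs | data_pool/Simple_codes/simple/2.py | xor_operations
-- ===== SOURCE A (Python) =====
-- def xor_operations(N, arr, M, K):
--     if M < 0 or M >= N:
--         return - 1
--     if K < 0 or K >= N - M:
--         return - 1
--     for _ in range(M):
--         temp = []
--         for i in range(len(arr) - 1):
--             value = arr[i] ^ arr[i + 1]
--             temp    .    append(value)
--         arr = temp[:]
--     ans = arr[K]
--     return ans
-- ===== SOURCE B (Python) =====
-- def xor_operations(N, arr, M, K):
--     if M < 0 or M >= N:
--         return -1
--     if K < 0 or K >= N - M: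
--         return -1
--     ans = 0
--     for i in range(M + 1):
--         if i & M == i:  # C(M, i) is odd exactly for submasks i of M (Lucas)
--             ans ^= arr[K + i]
--     return ans
-- ===== Notes on version B (the rewrite author's own statement) =====
-- stated objective: alternative
-- what changed: Instead of materialising M successive adjacent-XOR arrays of length ~N, B uses Lucas' theorem (C(M,i) is odd iff i is a submask of M) to XOR arr[K+i] over i in range(M+1) in one pass, touching only the window arr[K..K+M].
import Mathlib
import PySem

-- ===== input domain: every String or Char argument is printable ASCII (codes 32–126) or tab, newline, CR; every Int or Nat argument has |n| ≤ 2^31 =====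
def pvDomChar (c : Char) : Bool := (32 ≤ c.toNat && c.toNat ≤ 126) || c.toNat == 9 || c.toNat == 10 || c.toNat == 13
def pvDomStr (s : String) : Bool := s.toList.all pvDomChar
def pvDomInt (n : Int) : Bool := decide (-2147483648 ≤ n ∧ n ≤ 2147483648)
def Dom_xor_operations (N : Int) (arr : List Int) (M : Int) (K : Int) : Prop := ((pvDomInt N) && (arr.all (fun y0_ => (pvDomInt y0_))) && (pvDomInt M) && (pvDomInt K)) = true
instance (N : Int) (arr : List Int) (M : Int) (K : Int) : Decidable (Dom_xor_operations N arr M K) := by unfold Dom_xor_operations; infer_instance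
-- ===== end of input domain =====

-- B replaces A's M full adjacent-XOR passes by one Lucas-theorem pass (XOR of arr[K+i] over the submasks i of M), touching only the window arr[K..K+M]; equivalence of return values is proved on Pre_, which excludes exactly the inputs where BOTH programs raise IndexError (timing did not confirm a speedup, so none is claimed).

-- ===== PORT A =====
-- one round of the inner loop: temp = [arr[i] ^ arr[i+1] for i in range(len(arr)-1)]
-- (indices i, i+1 are always in range here, so List.getD is exact)
def pyXorStep (arr : List Int) : List Int :=
  (List.range (arr.length - 1)).foldl
    (fun temp i => temp ++ [PySem.Int.bxor (arr.getD i 0) (arr.getD (i + 1) 0)]) []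

def xor_operations (N : Int) (arr : List Int) (M : Int) (K : Int) : Int :=
  if M < 0 ∨ N ≤ M then -1
  else if K < 0 ∨ N - M ≤ K then -1
  else (PySem.List.pyGet? ((pyXorStep)^[M.toNat] arr) K).getD 0  -- arr[K]; none = IndexError, excluded by Pre_

-- ===== PORT B =====
def xor_operations_alt (N : Int) (arr : List Int) (M : Int) (K : Int) : Int :=
  if M < 0 ∨ N ≤ M then -1
  else if K < 0 ∨ N - M ≤ K then -1
  else (List.range (M.toNat + 1)).foldl
    (fun (ans : Int) (i : Nat) => if PySem.Int.band (i : Int) M = (i : Int)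
      then PySem.Int.bxor ans ((PySem.List.pyGet? arr (K + (i : Int))).getD 0) else ans) 0

-- ===== PRECONDITION & SPEC =====
-- Pre_ excludes exactly the inputs on which Python A raises IndexError (K past the shrunken
-- array); B raises IndexError on exactly the same inputs, so nothing A returns on is excluded.
def Pre_xor_operations (N : Int) (arr : List Int) (M : Int) (K : Int) : Prop :=
  (0 ≤ M ∧ M < N ∧ 0 ≤ K ∧ K < N - M) → K + M < (arr.length : Int)
instance (N : Int) (arr : List Int) (M : Int) (K : Int) : Decidable (Pre_xor_operations N arr M K) := by unfold Pre_xor_operations; infer_instance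

def pvWitness_xor_operations : Int × List Int × Int × Int := (3, [1, 2, 3], 1, 0)

def Spec_xor_operations (N : Int) (arr : List Int) (M : Int) (K : Int) (out : Int) : Prop := out = xor_operations_alt N arr M K
instance (N : Int) (arr : List Int) (M : Int) (K : Int) (out : Int) : Decidable (Spec_xor_operations N arr M K out) := by unfold Spec_xor_operations; infer_instance

-- ===== CLAIM (what is proved, stated in full; the proofs are below) =====
def Claim_equal_xor_operations : Prop := ∀ (N : Int) (arr : List Int) (M : Int) (K : Int), Dom_xor_operations N arr M K → Pre_xor_operations N arr M K → Spec_xor_operations N arr M K (xor_operations N arr M K)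

-- ===== LEMMAS AND PROOFS =====

-- ---- xor on Int forms a commutative group via the (sign, magnitude) encoding ----
def pvDec (p : Bool × Nat) : Int := if p.1 then -(p.2 : Int) - 1 else (p.2 : Int)
def pvEnc (a : Int) : Bool × Nat := if 0 ≤ a then (false, a.toNat) else (true, (-a - 1).toNat)

theorem pvDec_false (m : Nat) : pvDec (false, m) = (m : Int) := rfl
theorem pvDec_true (m : Nat) : pvDec (true, m) = -(m : Int) - 1 := rfl

theorem pvDec_enc (a : Int) : pvDec (pvEnc a) = a := by
  unfold pvEnc
  by_cases h : 0 ≤ a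
  · rw [if_pos h, pvDec_false]; omega
  · rw [if_neg h, pvDec_true]; omega

theorem bxor_dec (p q : Bool × Nat) :
    PySem.Int.bxor (pvDec p) (pvDec q) = pvDec (xor p.1 q.1, p.2 ^^^ q.2) := by
  obtain ⟨b₁, m⟩ := p; obtain ⟨b₂, n⟩ := q
  have h2 : ∀ j : Nat, (-(-(j : Int) - 1) - 1).toNat = j := fun j => by omega
  have h3 : ∀ j : Nat, ((j : Int)).toNat = j := fun j => Int.toNat_natCast j
  cases b₁ <;> cases b₂
  · rw [pvDec_false, pvDec_false, Bool.xor_false, pvDec_false]; exact PySem.Int.bxor_natCast m n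
  · rw [pvDec_false, pvDec_true, Bool.xor_true, Bool.not_false, pvDec_true,
      PySem.Int.bxor, if_pos (by omega), if_neg (by omega), h3, h2]
  · rw [pvDec_true, pvDec_false, Bool.xor_false, pvDec_true,
      PySem.Int.bxor, if_neg (by omega), if_pos (by omega), h3, h2]
  · rw [pvDec_true, pvDec_true, Bool.xor_true, Bool.not_true, pvDec_false,
      PySem.Int.bxor, if_neg (by omega), if_neg (by omega), h2, h2]

theorem bxor_assoc' (a b c : Int) :
    PySem.Int.bxor (PySem.Int.bxor a b) c = PySem.Int.bxor a (PySem.Int.bxor b c) := by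
  rw [← pvDec_enc a, ← pvDec_enc b, ← pvDec_enc c]
  rw [bxor_dec, bxor_dec, bxor_dec, bxor_dec]
  simp [Nat.xor_assoc]

theorem zero_bxor' (a : Int) : PySem.Int.bxor 0 a = a := by
  rw [PySem.Int.bxor_comm]; exact PySem.Int.bxor_zero a

-- ---- xor-sums over index lists ----
def xorSum (l : List Nat) (f : Nat → Int) : Int :=
  l.foldr (fun i a => PySem.Int.bxor (f i) a) 0

theorem xorSum_nil (f : Nat → Int) : xorSum [] f = 0 := rfl

theorem xorSum_cons (i : Nat) (l : List Nat) (f : Nat → Int) :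
    xorSum (i :: l) f = PySem.Int.bxor (f i) (xorSum l f) := rfl

theorem xorSum_append (l₁ l₂ : List Nat) (f : Nat → Int) :
    xorSum (l₁ ++ l₂) f = PySem.Int.bxor (xorSum l₁ f) (xorSum l₂ f) := by
  induction l₁ with
  | nil => simp [xorSum_nil, zero_bxor']
  | cons i l ih => simp only [List.cons_append, xorSum_cons, ih, bxor_assoc']

theorem xorSum_congr {l : List Nat} {f g : Nat → Int} (h : ∀ i ∈ l, f i = g i) :
    xorSum l f = xorSum l g := by
  induction l with
  | nil => rfl
  | cons i l ih =>
    rw [xorSum_cons, xorSum_cons, h i (by simp), ih (fun j hj => h j (by simp [hj]))]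

theorem xorSum_map (l : List Nat) (s : Nat → Nat) (f : Nat → Int) :
    xorSum (l.map s) f = xorSum l (fun i => f (s i)) := by
  induction l with
  | nil => rfl
  | cons i l ih => simp only [List.map_cons, xorSum_cons, ih]

theorem xorSum_split (l : List Nat) (f g : Nat → Int) :
    xorSum l (fun i => PySem.Int.bxor (f i) (g i)) =
      PySem.Int.bxor (xorSum l f) (xorSum l g) := by
  induction l with
  | nil => simp [xorSum_nil]
  | cons i l ih =>
    simp only [xorSum_cons, ih]
    rw [bxor_assoc', bxor_assoc']
    congr 1
    rw [← bxor_assoc', ← bxor_assoc', PySem.Int.bxor_comm (g i) (xorSum l f)]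

-- ---- the adjacent-xor step on infinite sequences ----
def seqStep (f : Nat → Int) : Nat → Int := fun k => PySem.Int.bxor (f k) (f (k + 1))

theorem seq_congr (m : Nat) (f g : Nat → Int) (k : Nat)
    (h : ∀ i, k ≤ i → i ≤ k + m → f i = g i) : (seqStep)^[m] f k = (seqStep)^[m] g k := by
  induction m generalizing f g with
  | zero => simpa using h k (le_refl k) (by omega)
  | succ m ih =>
    rw [Function.iterate_succ_apply, Function.iterate_succ_apply]
    apply ih
    intro i h₁ h₂
    unfold seqStep
    rw [h i (by omega) (by omega), h (i + 1) (by omega) (by omega)]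

-- ---- A's list computation agrees with the sequence computation ----
theorem pyXorStep_eq_map (arr : List Int) :
    pyXorStep arr = (List.range (arr.length - 1)).map
      (fun i => PySem.Int.bxor (arr.getD i 0) (arr.getD (i + 1) 0)) := by
  unfold pyXorStep
  rw [PySem.List.foldl_append_singleton_eq_map]
  simp

theorem pyXorStep_length (arr : List Int) : (pyXorStep arr).length = arr.length - 1 := by
  rw [pyXorStep_eq_map]; simp

theorem pyXorStep_getD (arr : List Int) (k : Nat) (h : k + 1 < arr.length) :
    (pyXorStep arr).getD k 0 = PySem.Int.bxor (arr.getD k 0) (arr.getD (k + 1) 0) := by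
  rw [pyXorStep_eq_map, List.getD_eq_getElem _ _ (by simp; omega)]
  simp

theorem bridge (m : Nat) (arr : List Int) (k : Nat) (h : k + m < arr.length) :
    ((pyXorStep)^[m] arr).getD k 0 = (seqStep)^[m] (fun i => arr.getD i 0) k := by
  induction m generalizing arr with
  | zero => simp
  | succ m ih =>
    rw [Function.iterate_succ_apply, Function.iterate_succ_apply]
    rw [ih (pyXorStep arr) (by rw [pyXorStep_length]; omega)]
    apply seq_congr
    intro i h₁ h₂
    exact pyXorStep_getD arr i (by omega)

-- ---- closed form: m rounds = xor over i with odd C(m,i) ----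
theorem seq_closed (m : Nat) (f : Nat → Int) (k : Nat) :
    (seqStep)^[m] f k =
      xorSum (List.range (m + 1)) (fun i => if Nat.choose m i % 2 = 1 then f (k + i) else 0) := by
  induction m generalizing f with
  | zero => simp [List.range_succ, xorSum_cons, xorSum_nil, PySem.Int.bxor_zero]
  | succ m ih =>
    rw [Function.iterate_succ_apply, ih (seqStep f)]
    have step1 : xorSum (List.range (m + 1))
        (fun i => if Nat.choose m i % 2 = 1 then seqStep f (k + i) else 0) =
        PySem.Int.bxor
          (xorSum (List.range (m + 1)) (fun i => if Nat.choose m i % 2 = 1 then f (k + i) else 0))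
          (xorSum (List.range (m + 1)) (fun i => if Nat.choose m i % 2 = 1 then f (k + i + 1) else 0)) := by
      rw [← xorSum_split]
      apply xorSum_congr
      intro i _
      by_cases hc : Nat.choose m i % 2 = 1
      · simp only [if_pos hc, seqStep]
      · simp only [if_neg hc]; rw [PySem.Int.bxor_zero]
    rw [step1]
    -- now transform the RHS sum over range (m+2)
    have rhs_eq : xorSum (List.range (m + 1 + 1))
        (fun j => if Nat.choose (m + 1) j % 2 = 1 then f (k + j) else 0) =
        PySem.Int.bxor
          (xorSum (List.range (m + 1 + 1)) (fun j => if Nat.choose m j % 2 = 1 then f (k + j) else 0))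
          (xorSum (List.range (m + 1 + 1)) (fun j => if 1 ≤ j ∧ Nat.choose m (j - 1) % 2 = 1 then f (k + j) else 0)) := by
      rw [← xorSum_split]
      apply xorSum_congr
      intro j _
      cases j with
      | zero => simp [Nat.choose_zero_right, PySem.Int.bxor_zero]
      | succ i =>
        have hp : Nat.choose (m + 1) (i + 1) = Nat.choose m i + Nat.choose m (i + 1) :=
          Nat.choose_succ_succ m i
        have h1 : Nat.choose m i % 2 = 0 ∨ Nat.choose m i % 2 = 1 := Nat.mod_two_eq_zero_or_one _
        have h2 : Nat.choose m (i + 1) % 2 = 0 ∨ Nat.choose m (i + 1) % 2 = 1 := Nat.mod_two_eq_zero_or_one _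
        rcases h1 with h1 | h1 <;> rcases h2 with h2 | h2 <;>
          simp [show (i + 1) - 1 = i from rfl, h1, h2,
            show Nat.choose (m + 1) (i + 1) % 2 = (Nat.choose m i + Nat.choose m (i + 1)) % 2 by rw [hp],
            Nat.add_mod, PySem.Int.bxor_zero, zero_bxor', PySem.Int.bxor_self]
    rw [rhs_eq]
    congr 1
    · -- drop the j = m+1 term of the first sum (C(m, m+1) = 0)
      have hdrop : xorSum (List.range (m + 1 + 1))
          (fun j => if Nat.choose m j % 2 = 1 then f (k + j) else 0) =
          xorSum (List.range (m + 1))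
          (fun j => if Nat.choose m j % 2 = 1 then f (k + j) else 0) := by
        conv_lhs => rw [List.range_succ]
        rw [xorSum_append, xorSum_cons, xorSum_nil,
          if_neg (by rw [Nat.choose_succ_self]; omega), zero_bxor', PySem.Int.bxor_zero]
      rw [hdrop]
    · -- shift the second sum: j = 0 term is 0, j = i+1 maps to i
      have hshift : xorSum (List.range (m + 1 + 1))
          (fun j => if 1 ≤ j ∧ Nat.choose m (j - 1) % 2 = 1 then f (k + j) else 0) =
          xorSum (List.range (m + 1))
          (fun i => if Nat.choose m i % 2 = 1 then f (k + i + 1) else 0) := by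
        rw [List.range_succ_eq_map, xorSum_cons, if_neg (by omega), zero_bxor', xorSum_map]
        apply xorSum_congr
        intro i _
        have hiff : (1 ≤ i + 1 ∧ Nat.choose m (i + 1 - 1) % 2 = 1) ↔ Nat.choose m i % 2 = 1 := by
          simp only [Nat.add_sub_cancel]; omega
        by_cases hc : Nat.choose m i % 2 = 1
        · rw [if_pos (hiff.mpr hc), if_pos hc, show k + (i + 1) = k + i + 1 from by omega]
        · rw [if_neg (fun h => hc (hiff.mp h)), if_neg hc]
      rw [hshift]

-- ---- Lucas' theorem for p = 2 ----
theorem lucas_testBit (n : Nat) : ∀ k : Nat,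
    (Nat.choose n k % 2 = 1 ↔ ∀ i, k.testBit i = true → n.testBit i = true) := by
  induction n using Nat.strong_induction_on with
  | _ n ih =>
    intro k
    rcases Nat.eq_zero_or_pos n with hn | hn
    · subst hn
      cases k with
      | zero => simp
      | succ k =>
        simp only [Nat.choose_zero_succ]
        constructor
        · intro h; omega
        · intro h
          have : (k + 1 : Nat) = 0 := by
            apply Nat.eq_of_testBit_eq
            intro i
            simp only [Nat.zero_testBit]
            by_contra hb
            simp only [Bool.not_eq_false] at hb
            have := h i hb
            simp [Nat.zero_testBit] at this
          omega
    · haveI : Fact (Nat.Prime 2) := ⟨Nat.prime_two⟩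
      have hmod : Nat.choose n k % 2 =
          (Nat.choose (n % 2) (k % 2) * Nat.choose (n / 2) (k / 2)) % 2 :=
        Choose.choose_modEq_choose_mod_mul_choose_div_nat
      have hrec := ih (n / 2) (by omega) (k / 2)
      have hmul : Nat.choose n k % 2 = 1 ↔
          (Nat.choose (n % 2) (k % 2) % 2 = 1 ∧ Nat.choose (n / 2) (k / 2) % 2 = 1) := by
        rw [hmod, Nat.mul_mod]
        rcases Nat.mod_two_eq_zero_or_one (Nat.choose (n % 2) (k % 2)) with h1 | h1 <;>
          rcases Nat.mod_two_eq_zero_or_one (Nat.choose (n / 2) (k / 2)) with h2 | h2 <;>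
            simp [h1, h2]
      have hlow : Nat.choose (n % 2) (k % 2) % 2 = 1 ↔ (k.testBit 0 = true → n.testBit 0 = true) := by
        have hn2 : n % 2 = 0 ∨ n % 2 = 1 := Nat.mod_two_eq_zero_or_one n
        have hk2 : k % 2 = 0 ∨ k % 2 = 1 := Nat.mod_two_eq_zero_or_one k
        rcases hn2 with h1 | h1 <;> rcases hk2 with h2 | h2 <;>
          simp [h1, h2, Nat.testBit_zero]
      rw [hmul, hlow, hrec]
      constructor
      · rintro ⟨h0, hs⟩ i hb
        cases i with
        | zero => exact h0 hb
        | succ i =>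
          rw [Nat.testBit_add_one] at hb ⊢
          exact hs i hb
      · intro h
        refine ⟨h 0, fun i hb => ?_⟩
        rw [← Nat.testBit_add_one] at hb ⊢
        exact h (i + 1) hb

theorem lucas2 (m i : Nat) : (Nat.choose m i % 2 = 1) ↔ (i &&& m = i) := by
  rw [lucas_testBit]
  constructor
  · intro h
    apply Nat.eq_of_testBit_eq
    intro j
    rw [Nat.testBit_and]
    cases hb : i.testBit j
    · simp
    · simp [h j hb]
  · intro h j hb
    have := congrArg (fun x => x.testBit j) h
    simp only [Nat.testBit_and, hb, Bool.true_and] at this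
    exact this

-- ---- B's fold is an xor-sum ----
theorem foldl_bxor (c : Nat → Prop) [DecidablePred c] (g : Nat → Int) (l : List Nat) (a : Int) :
    l.foldl (fun a i => if c i then PySem.Int.bxor a (g i) else a) a =
      PySem.Int.bxor a (xorSum l (fun i => if c i then g i else 0)) := by
  induction l generalizing a with
  | nil => simp [xorSum_nil, PySem.Int.bxor_zero]
  | cons i l ih =>
    simp only [List.foldl_cons, xorSum_cons]
    by_cases hc : c i
    · rw [if_pos hc, if_pos hc, ih, ← bxor_assoc']
    · rw [if_neg hc, if_neg hc, ih, zero_bxor']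

-- ===== VERDICT (by name: the statement is the Claim_ definition above) =====
theorem xor_operations_spec : Claim_equal_xor_operations := by
  unfold Claim_equal_xor_operations Spec_xor_operations
  intro N arr M K _ hpre
  unfold xor_operations xor_operations_alt
  split_ifs with h1 h2
  · rfl
  · rfl
  · have hM : 0 ≤ M := by omega
    have hK : 0 ≤ K := by omega
    have hlen : K + M < (arr.length : Int) := hpre ⟨by omega, by omega, by omega, by omega⟩
    set m := M.toNat with hm
    set k := K.toNat with hk
    have hMm : M = (m : Int) := (Int.toNat_of_nonneg hM).symm
    have hKk : K = (k : Int) := (Int.toNat_of_nonneg hK).symm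
    have hkm : k + m < arr.length := by omega
    -- A side
    have hA : (PySem.List.pyGet? ((pyXorStep)^[m] arr) K).getD 0 =
        ((pyXorStep)^[m] arr).getD k 0 := by
      rw [hKk, PySem.List.pyGet?_natCast]
      rw [List.getD_eq_getElem?_getD]
    rw [hA, bridge m arr k hkm, seq_closed]
    -- B side
    rw [foldl_bxor (fun i : Nat => PySem.Int.band (i : Int) M = (i : Int))
      (fun i : Nat => (PySem.List.pyGet? arr (K + (i : Int))).getD 0) (List.range (m + 1)) 0]
    rw [zero_bxor']
    apply xorSum_congr
    intro i hi
    have hi' : i ≤ m := by simp [List.mem_range] at hi; omega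
    have hcond : (PySem.Int.band (i : Int) M = (i : Int)) ↔ (i &&& m = i) := by
      rw [hMm, PySem.Int.band_natCast]
      exact_mod_cast Int.natCast_inj
    have hluc := lucas2 m i
    by_cases hc : i &&& m = i
    · have hget : (PySem.List.pyGet? arr (K + (i : Int))).getD 0 = arr.getD (k + i) 0 := by
        rw [hKk, show ((k : Int) + (i : Int)) = ((k + i : Nat) : Int) by push_cast; ring,
          PySem.List.pyGet?_natCast, List.getD_eq_getElem?_getD]
      rw [if_pos (hluc.mpr hc), if_pos (hcond.mpr hc), hget]
    · rw [if_neg (fun h => hc (hluc.mp h)), if_neg (fun h => hc (hcond.mp h))]
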